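-- pv_equiv track=rewrite | github.com/iamabdil/python_competition | Q3.py | list_partioner
-- ===== SOURCE A (Python) =====
-- def list_partioner(List, x):
--     # creating empty lists to store the x value and the numbers smaller and larger than x
--     x_smaller = []
--     x_larger = []
--     x_list = []
--
--     # assigning numbers to above lists depending on if they are smaller, larger or equal to x
--     for nums in List:
--         if nums == x:
--             x_list.append(nums)
--         elif nums < x:
--             x_smaller.append(nums)
--         else:
--             x_larger.append(nums)
--     # returning the addition of all three lists
--     return x_smaller + x_list + x_larger
-- ===== SOURCE B (Python) =====
-- def list_partioner(List, x):
--     # three independent filtering passes, concatenated; preserves within-group order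
--     return [n for n in List if n < x] + [n for n in List if n == x] + [n for n in List if n > x]
-- ===== Notes on version B (the rewrite author's own statement) =====
-- stated objective: simpler
-- what changed: Replaced the single dispatching loop with three accumulators by three independent filter passes (<, ==, >) concatenated in order.
import Mathlib
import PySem

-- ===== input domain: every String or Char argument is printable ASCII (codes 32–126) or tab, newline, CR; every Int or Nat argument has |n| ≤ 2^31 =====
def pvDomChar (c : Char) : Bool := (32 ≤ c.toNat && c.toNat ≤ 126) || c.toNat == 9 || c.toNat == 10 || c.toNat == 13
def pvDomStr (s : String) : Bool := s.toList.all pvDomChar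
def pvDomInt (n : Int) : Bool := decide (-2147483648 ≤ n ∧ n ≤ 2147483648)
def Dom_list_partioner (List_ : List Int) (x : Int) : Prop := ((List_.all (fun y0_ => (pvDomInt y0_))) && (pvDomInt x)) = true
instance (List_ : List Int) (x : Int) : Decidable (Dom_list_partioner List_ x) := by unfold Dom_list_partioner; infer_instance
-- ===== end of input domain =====

-- B replaces A's single dispatching loop over three accumulators with three independent filter passes; objective: simpler.

-- ===== PORT A =====
-- loop: foldl carrying the three accumulator lists (x_smaller, x_larger, x_list)
def list_partioner (List_ : List Int) (x : Int) : List Int :=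
  let acc := List_.foldl
    (fun (s : List Int × List Int × List Int) nums =>
      if nums == x then (s.1, s.2.1, s.2.2 ++ [nums])
      else if nums < x then (s.1 ++ [nums], s.2.1, s.2.2)
      else (s.1, s.2.1 ++ [nums], s.2.2))
    ([], [], [])
  acc.1 ++ acc.2.2 ++ acc.2.1

-- ===== PORT B =====
-- three filter passes, concatenated
def list_partioner_alt (List_ : List Int) (x : Int) : List Int :=
  (List_.filter (fun n => n < x)) ++ (List_.filter (fun n => n == x)) ++ (List_.filter (fun n => n > x))

-- ===== PRECONDITION & SPEC =====
def Spec_list_partioner (List_ : List Int) (x : Int) (out : List Int) : Prop := out = list_partioner_alt List_ x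
instance (List_ : List Int) (x : Int) (out : List Int) : Decidable (Spec_list_partioner List_ x out) := by unfold Spec_list_partioner; infer_instance

-- ===== CLAIM (what is proved, stated in full; the proofs are below) =====
def Claim_equal_list_partioner : Prop := ∀ (List_ : List Int) (x : Int), Dom_list_partioner List_ x → Spec_list_partioner List_ x (list_partioner List_ x)

-- ===== LEMMAS AND PROOFS =====
-- loop invariant: the fold starting from (s,l,e) yields the start lists followed by the filters
theorem partioner_fold_inv (x : Int) (L s l e : List Int) :
    L.foldl
      (fun (st : List Int × List Int × List Int) nums =>
        if nums == x then (st.1, st.2.1, st.2.2 ++ [nums])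
        else if nums < x then (st.1 ++ [nums], st.2.1, st.2.2)
        else (st.1, st.2.1 ++ [nums], st.2.2))
      (s, l, e)
    = (s ++ L.filter (fun n => n < x),
       l ++ L.filter (fun n => n > x),
       e ++ L.filter (fun n => n == x)) := by
  induction L generalizing s l e with
  | nil => simp
  | cons h t ih =>
    rw [List.foldl_cons]
    by_cases hx : h = x
    · rw [if_pos (by simp [hx]), ih]
      subst hx
      simp
    · rw [if_neg (by simp [hx])]
      by_cases hlt : h < x
      · rw [if_pos hlt, ih]
        have hng : ¬ h > x := by omega
        simp [hx, hlt, hng]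
      · rw [if_neg hlt, ih]
        have hg : h > x := by omega
        simp [hx, hlt, hg]

-- ===== VERDICT (by name: the statement is the Claim_ definition above) =====
theorem list_partioner_spec : Claim_equal_list_partioner := by
  intro L x _
  unfold Spec_list_partioner list_partioner list_partioner_alt
  rw [partioner_fold_inv]
  simp
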